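-- pv_equiv track=rewrite | github.com/parikls/fastapi-rbac | fastapi_rbac/permissions.py | implies
-- ===== SOURCE A (Python) =====
-- WILDCARD = "*"
--
-- SEPARATOR = ":"
--
-- def implies(held: str, required: str) -> bool:
--     """Check if a held permission implies (grants) a required permission.
--
--     Supports wildcards: 'report:*' implies 'report:read', 'report:delete', etc.
--     Global wildcard '*' implies everything.
--     """
--     held_parts = held.split(SEPARATOR)
--     required_parts = required.split(SEPARATOR)
--
--     for i, held_part in enumerate(held_parts):
--         if held_part == WILDCARD:
--             return True
--         if i >= len(required_parts):
--             return False
--         if held_part != required_parts[i]: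
--             return False
--
--     return len(held_parts) == len(required_parts)
-- ===== SOURCE B (Python) =====
-- SEPARATOR = ":"
-- WILDCARD = "*"
--
-- def implies(held: str, required: str) -> bool:
--     held_parts = held.split(SEPARATOR)
--     required_parts = required.split(SEPARATOR)
--     if WILDCARD in held_parts:
--         j = held_parts.index(WILDCARD)
--         return held_parts[:j] == required_parts[:j]
--     return held_parts == required_parts
-- ===== Notes on version B (the rewrite author's own statement) =====
-- stated objective: simpler
-- what changed: Replaces the guarded per-element loop with early returns by locate-the-wildcard then bulk list comparison: prefix equality up to the first '*', or whole-list equality if there is none.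
import Mathlib
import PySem

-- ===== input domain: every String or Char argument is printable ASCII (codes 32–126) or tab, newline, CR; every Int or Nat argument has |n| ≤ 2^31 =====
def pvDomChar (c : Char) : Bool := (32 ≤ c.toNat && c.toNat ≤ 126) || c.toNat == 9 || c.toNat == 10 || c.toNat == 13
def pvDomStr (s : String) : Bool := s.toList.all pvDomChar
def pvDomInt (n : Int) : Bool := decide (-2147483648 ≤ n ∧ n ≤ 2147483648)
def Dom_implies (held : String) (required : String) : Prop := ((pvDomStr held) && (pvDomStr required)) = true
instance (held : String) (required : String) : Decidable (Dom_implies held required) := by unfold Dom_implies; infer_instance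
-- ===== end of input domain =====

-- B changes the decomposition only (locate the wildcard, then bulk list comparison); no speed claim.

-- ===== PORT A =====
-- the for-loop over enumerate(held_parts): i is the loop index; required_parts[i] is
-- in range because the preceding branch returned False otherwise, so getD is exact here
def impliesGo (rp : List String) : Nat → List String → Bool
  | i, [] => i == rp.length               -- loop fell through: len(held_parts) == len(required_parts)
  | i, h :: t =>
    if h = "*" then true
    else if rp.length ≤ i then false
    else if h ≠ rp.getD i "" then false
    else impliesGo rp (i + 1) t

def implies (held : String) (required : String) : Bool :=
  let held_parts := (PySem.Str.split? held ":").getD []       -- sep ":" ≠ "", split? is some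
  let required_parts := (PySem.Str.split? required ":").getD []
  impliesGo required_parts 0 held_parts

-- ===== PORT B =====
def implies_alt (held : String) (required : String) : Bool :=
  let held_parts := (PySem.Str.split? held ":").getD []       -- sep ":" ≠ "", split? is some
  let required_parts := (PySem.Str.split? required ":").getD []
  match PySem.List.index? held_parts "*" with   -- '*' in held_parts; held_parts.index('*')
  | some j => held_parts.take j == required_parts.take j
  | none => held_parts == required_parts

-- ===== PRECONDITION & SPEC =====
def Spec_implies (held : String) (required : String) (out : Bool) : Prop := out = implies_alt held required
instance (held : String) (required : String) (out : Bool) : Decidable (Spec_implies held required out) := by unfold Spec_implies; infer_instance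

-- ===== CLAIM (what is proved, stated in full; the proofs are below) =====
def Claim_equal_implies : Prop := ∀ (held : String) (required : String), Dom_implies held required → Spec_implies held required (implies held required)

-- ===== LEMMAS AND PROOFS =====

-- the core of B, on the suffix of required_parts that A's loop has not yet consumed
def altCore (hp rp : List String) : Bool :=
  match PySem.List.index? hp "*" with
  | some j => hp.take j == rp.take j
  | none => hp == rp

lemma altCore_cons_same (x : String) (t rp' : List String) (hx : x ≠ "*") :
    altCore (x :: t) (x :: rp') = altCore t rp' := by
  unfold altCore
  rw [PySem.List.index?_cons_of_ne t hx]
  cases h : PySem.List.index? t "*" <;> simp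

lemma altCore_cons_ne (x y : String) (t rp' : List String) (hx : x ≠ "*") (hxy : x ≠ y) :
    altCore (x :: t) (y :: rp') = false := by
  unfold altCore
  rw [PySem.List.index?_cons_of_ne t hx]
  cases h : PySem.List.index? t "*" <;> simp [hxy]

lemma altCore_nil_right (x : String) (t : List String) (hx : x ≠ "*") :
    altCore (x :: t) [] = false := by
  unfold altCore
  rw [PySem.List.index?_cons_of_ne t hx]
  cases h : PySem.List.index? t "*" <;> simp

lemma impliesGo_eq_altCore (hp : List String) : ∀ (rp : List String) (i : Nat),
    i ≤ rp.length → impliesGo rp i hp = altCore hp (rp.drop i) := by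
  induction hp with
  | nil =>
    intro rp i hi
    simp only [impliesGo, altCore]
    rw [show PySem.List.index? ([] : List String) "*" = none from rfl]
    by_cases he : i = rp.length
    · subst he; simp
    · have hilt : i < rp.length := lt_of_le_of_ne hi he
      cases hd : rp.drop i with
      | nil => rw [List.drop_eq_nil_iff] at hd; omega
      | cons a l => simp [he]
  | cons h t ih =>
    intro rp i hi
    by_cases hw : h = "*"
    · subst hw
      rw [impliesGo]
      unfold altCore
      rw [PySem.List.index?_cons_self]
      simp
    · by_cases hlen : rp.length ≤ i
      · have hdrop : rp.drop i = [] := by rw [List.drop_eq_nil_iff]; omega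
        rw [impliesGo, hdrop, altCore_nil_right _ _ hw]
        simp [hw, hlen]
      · have hilt : i < rp.length := by omega
        have hdrop : rp.drop i = rp[i] :: rp.drop (i + 1) :=
          List.drop_eq_getElem_cons hilt
        have hgetD : rp.getD i "" = rp[i] := List.getD_eq_getElem rp "" hilt
        by_cases hm : h = rp[i]
        · rw [impliesGo, hdrop]
          subst hm
          rw [altCore_cons_same _ _ _ hw]
          simp only [hw, if_false, hlen, if_false, ite_not, hgetD, if_true]
          exact ih rp (i + 1) (by omega)
        · rw [impliesGo, hdrop, altCore_cons_ne _ _ _ _ hw hm]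
          simp [hw, hlen, hm, List.getElem?_eq_getElem hilt]

-- ===== VERDICT (by name: the statement is the Claim_ definition above) =====
theorem implies_spec : Claim_equal_implies := by
  intro held required _
  unfold Spec_implies implies implies_alt
  rw [impliesGo_eq_altCore _ _ 0 (Nat.zero_le _)]
  rfl
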